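-- pv_equiv track=rewrite | github.com/giridhar-aditya/Uni-Codebase | Semester-6/AILR/largest_space.py | largest_zero_region
-- ===== SOURCE A (Python) =====
-- def largest_zero_region(matrix):
--     rows, cols = len(matrix), len(matrix[0])
--     visited = [[False] * cols for _ in range(rows)]
--     def dfs(r, c):
--         if r < 0 or r >= rows or c < 0 or c >= cols:
--             return 0
--         if visited[r][c] or matrix[r][c] != 0:
--             return 0
--         visited[r][c] = True
--         size = 1
--         size += dfs(r+1, c)
--         size += dfs(r-1, c)
--         size += dfs(r, c+1)
--         size += dfs(r, c-1)
--         return size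
--     max_region = 0
--     for i in range(rows):
--         for j in range(cols):
--             if matrix[i][j] == 0 and not visited[i][j]:
--                 max_region = max(max_region, dfs(i, j))
--     return max_region
-- ===== SOURCE B (Python) =====
-- def largest_zero_region(matrix):
--     rows, cols = len(matrix), len(matrix[0])
--     remaining = {(r, c) for r in range(rows) for c in range(cols) if matrix[r][c] == 0}
--     best = 0
--     while remaining:
--         stack = [remaining.pop()]
--         size = 0
--         while stack:
--             r, c = stack.pop()
--             size += 1
--             for nb in ((r + 1, c), (r - 1, c), (r, c + 1), (r, c - 1)):
--                 if nb in remaining: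
--                     remaining.remove(nb)
--                     stack.append(nb)
--         best = max(best, size)
--     return best
-- ===== Notes on version B (the rewrite author's own statement) =====
-- stated objective: alternative
-- what changed: Replaces the recursive DFS over a boolean visited grid (with per-call bounds and zero checks) by an iterative worklist flood fill over a pre-built set of zero coordinates: membership in the shrinking set replaces the bounds/zero/visited tests and the visited grid, and seeds are drawn from the set instead of rescanning the whole grid.
import Mathlib
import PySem

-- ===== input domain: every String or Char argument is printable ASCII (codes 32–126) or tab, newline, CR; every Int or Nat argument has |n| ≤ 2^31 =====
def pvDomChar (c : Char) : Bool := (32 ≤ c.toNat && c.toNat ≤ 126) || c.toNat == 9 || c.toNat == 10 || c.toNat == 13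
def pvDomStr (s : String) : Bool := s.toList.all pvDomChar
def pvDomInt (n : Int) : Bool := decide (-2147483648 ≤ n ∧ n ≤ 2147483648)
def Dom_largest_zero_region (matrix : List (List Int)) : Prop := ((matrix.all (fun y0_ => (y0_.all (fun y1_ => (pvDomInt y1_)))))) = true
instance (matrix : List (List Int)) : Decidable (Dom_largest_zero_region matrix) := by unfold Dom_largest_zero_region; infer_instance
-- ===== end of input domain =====

-- B replaces A's recursive DFS over a boolean visited grid by an iterative worklist
-- flood fill over a pre-built set of zero coordinates (alternative algorithm, same cost).


-- ===== PORT A =====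
-- matrix[r][c]; exact whenever both indices are in range (guaranteed at every use under Pre_)
def pvA_get (m : List (List Int)) (r c : Int) : Int :=
  (PySem.List.pyGet? ((PySem.List.pyGet? m r).getD []) c).getD 1

-- the inner `def dfs(r, c)` of A; `visited` is the set of cells holding True; fuel makes the
-- recursion structural (the top-level call supplies rows*cols+1, which is never exhausted)
def pvA_dfs (m : List (List Int)) (rows cols : Int) (fuel : Nat)
    (visited : Finset (Int × Int)) (r c : Int) : Int × Finset (Int × Int) :=
  match fuel with
  | 0 => (0, visited)
  | fuel + 1 =>
    if r < 0 ∨ r ≥ rows ∨ c < 0 ∨ c ≥ cols then (0, visited)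
    else if (r, c) ∈ visited ∨ pvA_get m r c ≠ 0 then (0, visited)
    else
      let v0 := insert (r, c) visited
      let d1 := pvA_dfs m rows cols fuel v0 (r + 1) c
      let d2 := pvA_dfs m rows cols fuel d1.2 (r - 1) c
      let d3 := pvA_dfs m rows cols fuel d2.2 r (c + 1)
      let d4 := pvA_dfs m rows cols fuel d3.2 r (c - 1)
      (1 + d1.1 + d2.1 + d3.1 + d4.1, d4.2)

def largest_zero_region (matrix : List (List Int)) : Int :=
  let rows : Int := matrix.length
  let cols : Int := ((PySem.List.pyGet? matrix 0).getD []).length   -- len(matrix[0]); Pre_ guarantees matrix ≠ []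
  let fin := (PySem.List.pyRange 0 rows 1).foldl (fun st i =>
      (PySem.List.pyRange 0 cols 1).foldl (fun (st : Int × Finset (Int × Int)) j =>
        if pvA_get matrix i j = 0 ∧ (i, j) ∉ st.2 then
          let d := pvA_dfs matrix rows cols (matrix.length * ((PySem.List.pyGet? matrix 0).getD []).length + 1) st.2 i j
          (max st.1 d.1, d.2)
        else st) st) ((0 : Int), (∅ : Finset (Int × Int)))
  fin.1

-- ===== PORT B =====
-- one step of B's inner `for nb in (...)` loop: move nb from `remaining` onto the stack
def pvB_move (st : List (Int × Int) × List (Int × Int)) (nb : Int × Int) :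
    List (Int × Int) × List (Int × Int) :=
  if nb ∈ st.1 then (st.1.erase nb, nb :: st.2) else st

theorem pvB_move_sum (ns : List (Int × Int)) (st : List (Int × Int) × List (Int × Int)) :
    (ns.foldl pvB_move st).1.length + (ns.foldl pvB_move st).2.length
      = st.1.length + st.2.length := by
  induction ns generalizing st with
  | nil => rfl
  | cons n ns ih =>
    simp only [List.foldl_cons]
    rw [ih]
    unfold pvB_move
    split
    · rename_i h
      simp [List.length_erase_of_mem h]
      have : st.1.length ≠ 0 := by
        intro h0; rw [List.length_eq_zero_iff] at h0; simp [h0] at h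
      omega
    · rfl

theorem pvB_move_fst_len (ns : List (Int × Int)) (st : List (Int × Int) × List (Int × Int)) :
    (ns.foldl pvB_move st).1.length ≤ st.1.length := by
  induction ns generalizing st with
  | nil => exact le_refl _
  | cons n ns ih =>
    simp only [List.foldl_cons]
    refine le_trans (ih _) ?_
    unfold pvB_move
    split
    · exact List.length_erase_le
    · exact le_refl _

-- B's inner `while stack:` loop; returns (size, remaining)
def pvB_inner (remaining stack : List (Int × Int)) (size : Int) :
    Int × List (Int × Int) :=
  match h : stack with
  | [] => (size, remaining)
  | (r, c) :: rest =>
    let st := [(r + 1, c), (r - 1, c), (r, c + 1), (r, c - 1)].foldl pvB_move (remaining, rest)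
    pvB_inner st.1 st.2 (size + 1)
termination_by remaining.length + stack.length
decreasing_by
  have := pvB_move_sum [(r + 1, c), (r - 1, c), (r, c + 1), (r, c - 1)] (remaining, rest)
  simp_all

theorem pvB_inner_len (remaining stack : List (Int × Int)) (size : Int) :
    (pvB_inner remaining stack size).2.length ≤ remaining.length := by
  induction remaining, stack, size using pvB_inner.induct with
  | case1 => simp [pvB_inner]
  | case2 rem size r c rest st ih =>
    rw [pvB_inner]
    exact le_trans ih (pvB_move_fst_len _ _)

-- B's outer `while remaining:` loop
def pvB_outer (remaining : List (Int × Int)) (best : Int) : Int :=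
  match remaining with
  | [] => best
  | seed :: rest =>
    let d := pvB_inner rest [seed] 0
    pvB_outer d.2 (max best d.1)
termination_by remaining.length
decreasing_by
  have := pvB_inner_len rest [seed] 0
  simp_all

def largest_zero_region_alt (matrix : List (List Int)) : Int :=
  let rows := matrix.length
  let cols := (matrix.headD []).length   -- len(matrix[0]); Pre_ guarantees matrix ≠ []
  let remaining := (List.range rows).flatMap (fun r =>
    (List.range cols).filterMap (fun c =>
      if (matrix.getD r []).getD c 1 = 0 then some ((r : Int), (c : Int)) else none))
  pvB_outer remaining 0

-- ===== PRECONDITION & SPEC =====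
-- Pre_ excludes exactly the inputs on which A raises IndexError: the empty matrix
-- (matrix[0]) and, when the first row is nonempty, matrices containing a row shorter
-- than the first (the scan `matrix[i][j]` then goes out of range).
def Pre_largest_zero_region (matrix : List (List Int)) : Prop :=
  matrix ≠ [] ∧ ∀ row ∈ matrix, (matrix.headD []).length ≤ row.length
instance (matrix : List (List Int)) : Decidable (Pre_largest_zero_region matrix) := by
  unfold Pre_largest_zero_region; infer_instance
def pvWitness_largest_zero_region : List (List Int) := [[0, 1], [0, 0]]

def Spec_largest_zero_region (matrix : List (List Int)) (out : Int) : Prop := out = largest_zero_region_alt matrix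
instance (matrix : List (List Int)) (out : Int) : Decidable (Spec_largest_zero_region matrix out) := by unfold Spec_largest_zero_region; infer_instance

-- ===== CLAIM (what is proved, stated in full; the proofs are below) =====
def Claim_equal_largest_zero_region : Prop := ∀ (matrix : List (List Int)), Dom_largest_zero_region matrix → Pre_largest_zero_region matrix → Spec_largest_zero_region matrix (largest_zero_region matrix)

-- ===== LEMMAS AND PROOFS =====

-- ---- the common model: grid graph on the zero cells ----

def pvAdj (p q : Int × Int) : Prop :=
  q = (p.1 + 1, p.2) ∨ q = (p.1 - 1, p.2) ∨ q = (p.1, p.2 + 1) ∨ q = (p.1, p.2 - 1)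

theorem pvAdj_symm {p q : Int × Int} (h : pvAdj p q) : pvAdj q p := by
  obtain ⟨a, b⟩ := p; obtain ⟨x, y⟩ := q
  simp only [pvAdj, Prod.mk.injEq] at *
  omega

-- reachability inside the free set G
def pvReach (G : Finset (Int × Int)) (s q : Int × Int) : Prop :=
  s ∈ G ∧ Relation.ReflTransGen (fun a b => b ∈ G ∧ pvAdj a b) s q

noncomputable def pvComp (G : Finset (Int × Int)) (s : Int × Int) : Finset (Int × Int) :=
  letI := Classical.decPred (fun q => pvReach G s q)
  Finset.filter (fun q => pvReach G s q) G

-- the value both programs compute: the largest component size of the free set G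
noncomputable def pvPhi (G : Finset (Int × Int)) : ℕ :=
  G.sup (fun p => (pvComp G p).card)

theorem pvReach_mem {G : Finset (Int × Int)} {s q : Int × Int} (h : pvReach G s q) : q ∈ G := by
  obtain ⟨hs, h⟩ := h
  induction h with
  | refl => exact hs
  | tail _ h2 _ => exact h2.1

theorem pvReach_refl {G : Finset (Int × Int)} {s : Int × Int} (h : s ∈ G) : pvReach G s s :=
  ⟨h, Relation.ReflTransGen.refl⟩

theorem pvReach_tail {G : Finset (Int × Int)} {s p q : Int × Int}
    (h : pvReach G s p) (hq : q ∈ G) (hadj : pvAdj p q) : pvReach G s q :=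
  ⟨h.1, h.2.tail ⟨hq, hadj⟩⟩

theorem pvReach_trans {G : Finset (Int × Int)} {s p q : Int × Int}
    (h1 : pvReach G s p) (h2 : pvReach G p q) : pvReach G s q :=
  ⟨h1.1, h1.2.trans h2.2⟩

theorem pvReach_mono {G G' : Finset (Int × Int)} (hsub : G ⊆ G') {s q : Int × Int}
    (h : pvReach G s q) : pvReach G' s q := by
  refine ⟨hsub h.1, ?_⟩
  exact Relation.ReflTransGen.mono (fun a b hab => ⟨hsub hab.1, hab.2⟩) h.2

theorem pvReach_symm {G : Finset (Int × Int)} {s q : Int × Int}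
    (h : pvReach G s q) : pvReach G q s := by
  obtain ⟨hs, h2⟩ := h
  induction h2 with
  | refl => exact pvReach_refl hs
  | tail h1 h2 ih =>
    exact pvReach_trans ⟨h2.1, Relation.ReflTransGen.single
      ⟨(pvReach_mem ⟨hs, h1⟩), pvAdj_symm h2.2⟩⟩ ih

theorem mem_pvComp {G : Finset (Int × Int)} {s q : Int × Int} :
    q ∈ pvComp G s ↔ pvReach G s q := by
  unfold pvComp
  letI := Classical.decPred (fun q => pvReach G s q)
  rw [Finset.mem_filter]
  exact ⟨fun h => h.2, fun h => ⟨pvReach_mem h, h⟩⟩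

theorem pvComp_subset {G : Finset (Int × Int)} {s : Int × Int} : pvComp G s ⊆ G := by
  intro q hq; exact pvReach_mem (mem_pvComp.1 hq)

theorem self_mem_pvComp {G : Finset (Int × Int)} {s : Int × Int} (h : s ∈ G) :
    s ∈ pvComp G s := mem_pvComp.2 (pvReach_refl h)

theorem pvComp_closed {G : Finset (Int × Int)} {s p q : Int × Int}
    (hp : p ∈ pvComp G s) (hq : q ∈ G) (hadj : pvAdj p q) : q ∈ pvComp G s :=
  mem_pvComp.2 (pvReach_tail (mem_pvComp.1 hp) hq hadj)

theorem pvComp_min {G : Finset (Int × Int)} {s : Int × Int} (T : Finset (Int × Int))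
    (hs : s ∈ T) (hcl : ∀ p ∈ T, ∀ q ∈ G, pvAdj p q → q ∈ T) :
    pvComp G s ⊆ T := by
  intro q hq
  obtain ⟨_, h⟩ := mem_pvComp.1 hq
  induction h with
  | refl => exact hs
  | tail h1 h2 ih =>
    refine hcl _ (ih ?_) _ h2.1 h2.2
    exact mem_pvComp.2 ⟨(mem_pvComp.1 hq).1, h1⟩

theorem pvComp_eq_of_mem {G : Finset (Int × Int)} {s q : Int × Int}
    (h : q ∈ pvComp G s) : pvComp G q = pvComp G s := by
  have hr := mem_pvComp.1 h
  ext t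
  simp only [mem_pvComp]
  exact ⟨fun ht => pvReach_trans hr ht, fun ht => pvReach_trans (pvReach_symm hr) ht⟩

theorem pvComp_subset_pvComp {G G' : Finset (Int × Int)} {s n : Int × Int}
    (hsub : G' ⊆ G) (hn : pvReach G s n) : pvComp G' n ⊆ pvComp G s := by
  intro t ht
  exact mem_pvComp.2 (pvReach_trans hn (pvReach_mono hsub (mem_pvComp.1 ht)))

-- removing a whole component does not change the other components
theorem pvComp_sdiff {G : Finset (Int × Int)} {c p : Int × Int}
    (hp : p ∈ G \ pvComp G c) : pvComp (G \ pvComp G c) p = pvComp G p := by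
  have hpG : p ∈ G := (Finset.mem_sdiff.1 hp).1
  have hpK : p ∉ pvComp G c := (Finset.mem_sdiff.1 hp).2
  ext t
  simp only [mem_pvComp]
  constructor
  · exact fun ht => pvReach_mono Finset.sdiff_subset ht
  · rintro ⟨-, ht⟩
    induction ht with
    | refl => exact pvReach_refl hp
    | tail h1 h2 ih =>
      rename_i u t
      refine pvReach_tail ih ?_ h2.2
      rw [Finset.mem_sdiff]
      refine ⟨h2.1, fun htK => hpK ?_⟩
      -- t ∈ comp c and p reaches t ⇒ p ∈ comp c
      have hpt : pvReach G p t := pvReach_tail ⟨hpG, h1⟩ h2.1 h2.2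
      exact mem_pvComp.2 (pvReach_trans (mem_pvComp.1 htK) (pvReach_symm hpt))

-- peeling one component off shrinks pvPhi accordingly
theorem pvPhi_step {G : Finset (Int × Int)} {c : Int × Int} (hc : c ∈ G) :
    (pvPhi G : Int) = max ((pvComp G c).card : Int) (pvPhi (G \ pvComp G c)) := by
  have hK : pvComp G c ⊆ G := pvComp_subset
  have hsplit : G = pvComp G c ∪ (G \ pvComp G c) := by
    rw [Finset.union_sdiff_of_subset hK]
  have h1 : pvPhi G = max ((pvComp G c).card) (pvPhi (G \ pvComp G c)) := by
    unfold pvPhi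
    rw [show (G.sup fun p => (pvComp G p).card)
        = ((pvComp G c ∪ (G \ pvComp G c)).sup fun p => (pvComp G p).card) from by
      rw [Finset.union_sdiff_of_subset hK]]
    rw [Finset.sup_union]
    have hA : (pvComp G c).sup (fun p => (pvComp G p).card) = (pvComp G c).card := by
      have hne : (pvComp G c).Nonempty := ⟨c, self_mem_pvComp hc⟩
      have : ∀ p ∈ pvComp G c, (pvComp G p).card = (pvComp G c).card := by
        intro p hp; rw [pvComp_eq_of_mem hp]
      rw [Finset.sup_congr rfl this]
      exact Finset.sup_const hne _
    have hB : (G \ pvComp G c).sup (fun p => (pvComp G p).card)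
        = (G \ pvComp G c).sup (fun p => (pvComp (G \ pvComp G c) p).card) := by
      refine Finset.sup_congr rfl ?_
      intro p hp; rw [pvComp_sdiff hp]
    rw [hA, hB]
  rw [h1]
  push_cast [Nat.cast_max]
  rfl

-- ---- the allowed set of a matrix ----

def pvAt (m : List (List Int)) (p : Int × Int) : Int :=
  (m.getD p.1.toNat []).getD p.2.toNat 1

def pvAllowed (m : List (List Int)) : Finset (Int × Int) :=
  (((Finset.range m.length) ×ˢ (Finset.range (m.headD []).length)).filter
    (fun p => (m.getD p.1 []).getD p.2 1 = 0)).image (fun p => ((p.1 : Int), (p.2 : Int)))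

theorem mem_pvAllowed {m : List (List Int)} {p : Int × Int} :
    p ∈ pvAllowed m ↔ 0 ≤ p.1 ∧ p.1 < (m.length : Int) ∧ 0 ≤ p.2 ∧
      p.2 < ((m.headD []).length : Int) ∧ pvAt m p = 0 := by
  obtain ⟨a, b⟩ := p
  unfold pvAllowed pvAt
  simp only [Finset.mem_image, Finset.mem_filter, Finset.mem_product, Finset.mem_range,
    Prod.mk.injEq, Prod.exists]
  constructor
  · rintro ⟨x, y, ⟨⟨hx, hy⟩, hz⟩, rfl, rfl⟩
    simp only [Int.toNat_natCast]
    refine ⟨by positivity, by exact_mod_cast hx, by positivity, by exact_mod_cast hy, hz⟩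
  · rintro ⟨ha, halt, hb, hblt, hz⟩
    refine ⟨a.toNat, b.toNat, ⟨⟨?_, ?_⟩, hz⟩, ?_, ?_⟩ <;> omega


-- ---- B-side characterization ----

theorem pv_toFinset_erase {l : List (Int × Int)} {a : Int × Int} (h : l.Nodup) :
    (l.erase a).toFinset = l.toFinset.erase a := by
  ext x
  simp [h.mem_erase_iff, Finset.mem_erase]

theorem pvAdj_ne {p q : Int × Int} (h : pvAdj p q) : q ≠ p := by
  obtain ⟨a, b⟩ := p; obtain ⟨x, y⟩ := q
  simp only [pvAdj, Prod.mk.injEq, ne_eq] at *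
  omega

theorem pv_mem_nbrs {r c : Int} {q : Int × Int} :
    q ∈ [(r + 1, c), (r - 1, c), (r, c + 1), (r, c - 1)] ↔ pvAdj (r, c) q := by
  simp [pvAdj]

-- the cells reachable from a set of seeds inside G
noncomputable def pvKset (G S : Finset (Int × Int)) : Finset (Int × Int) :=
  letI := Classical.decPred (fun q => ∃ x ∈ S, pvReach G x q)
  G.filter (fun q => ∃ x ∈ S, pvReach G x q)

theorem mem_pvKset {G S : Finset (Int × Int)} {q : Int × Int} :
    q ∈ pvKset G S ↔ ∃ x ∈ S, pvReach G x q := by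
  unfold pvKset
  letI := Classical.decPred (fun q => ∃ x ∈ S, pvReach G x q)
  rw [Finset.mem_filter]
  exact ⟨fun h => h.2, fun h => ⟨by obtain ⟨x, _, hx⟩ := h; exact pvReach_mem hx, h⟩⟩

theorem pvKset_empty {G : Finset (Int × Int)} : pvKset G ∅ = ∅ := by
  ext q; simp [mem_pvKset]

theorem pvKset_singleton {G : Finset (Int × Int)} {s : Int × Int} :
    pvKset G {s} = pvComp G s := by
  ext q; simp [mem_pvKset, mem_pvComp]

theorem pvKset_subset {G S : Finset (Int × Int)} : pvKset G S ⊆ G := by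
  intro q hq; obtain ⟨x, _, hx⟩ := mem_pvKset.1 hq; exact pvReach_mem hx

-- processing one seed x: its neighbours become seeds inside G.erase x
theorem pvK_cut {G S S1 : Finset (Int × Int)} {x : Int × Int}
    (hxG : x ∈ G) (hxS : x ∈ S)
    (h1 : ∀ q ∈ S1, q ∈ S.erase x ∨ (q ∈ G.erase x ∧ pvAdj x q))
    (h2 : ∀ q, q ∈ S.erase x → q ∈ G.erase x → q ∈ S1)
    (h3 : ∀ q, q ∈ G.erase x → pvAdj x q → q ∈ S1) :
    pvKset G S = insert x (pvKset (G.erase x) S1) := by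
  ext q
  simp only [Finset.mem_insert, mem_pvKset]
  constructor
  · rintro ⟨y, hyS, hyG, hrtg⟩
    -- induction along the path
    induction hrtg with
    | refl =>
      by_cases hyx : y = x
      · exact Or.inl hyx
      · refine Or.inr ⟨y, h2 y (Finset.mem_erase.2 ⟨hyx, hyS⟩) (Finset.mem_erase.2 ⟨hyx, hyG⟩), ?_⟩
        exact pvReach_refl (Finset.mem_erase.2 ⟨hyx, hyG⟩)
    | tail h1' h2' ih =>
      rename_i u t
      rcases ih with hux | ⟨z, hzS1, hz⟩
      · have hadj : pvAdj x t := hux ▸ h2'.2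
        have htx : t ≠ x := pvAdj_ne hadj
        have htG : t ∈ G.erase x := Finset.mem_erase.2 ⟨htx, h2'.1⟩
        exact Or.inr ⟨t, h3 t htG hadj, pvReach_refl htG⟩
      · by_cases htx : t = x
        · exact Or.inl htx
        · have htG : t ∈ G.erase x := Finset.mem_erase.2 ⟨htx, h2'.1⟩
          exact Or.inr ⟨z, hzS1, pvReach_tail hz htG h2'.2⟩
  · rintro (hqx | ⟨y, hyS1, hy⟩)
    · refine ⟨x, hxS, ?_⟩
      rw [hqx]
      exact pvReach_refl hxG
    · rcases h1 y hyS1 with hyS | ⟨hyG, hadj⟩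
      · exact ⟨y, Finset.mem_of_mem_erase hyS, pvReach_mono (Finset.erase_subset _ _) hy⟩
      · refine ⟨x, hxS, pvReach_trans ?_ (pvReach_mono (Finset.erase_subset _ _) hy)⟩
        exact pvReach_tail (pvReach_refl hxG) (Finset.mem_of_mem_erase hyG) hadj

-- what the neighbour-moving fold does to the two lists
theorem pvB_move_fold_spec (ns : List (Int × Int)) :
    ∀ (rem st : List (Int × Int)), rem.Nodup → st.Nodup → (∀ x ∈ st, x ∉ rem) →
    (ns.foldl pvB_move (rem, st)).1.Nodup ∧
    (ns.foldl pvB_move (rem, st)).2.Nodup ∧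
    (∀ x ∈ (ns.foldl pvB_move (rem, st)).2, x ∉ (ns.foldl pvB_move (rem, st)).1) ∧
    (ns.foldl pvB_move (rem, st)).1.toFinset = rem.toFinset \ ns.toFinset ∧
    (ns.foldl pvB_move (rem, st)).2.toFinset = st.toFinset ∪ (rem.toFinset ∩ ns.toFinset) := by
  induction ns with
  | nil =>
    intro rem st h1 h2 h3
    exact ⟨h1, h2, h3, by simp, by simp⟩
  | cons n ns ih =>
    intro rem st h1 h2 h3
    simp only [List.foldl_cons]
    by_cases hn : n ∈ rem
    · rw [show pvB_move (rem, st) n = (rem.erase n, n :: st) from by simp [pvB_move, hn]]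
      obtain ⟨c1, c2, c3, c4, c5⟩ := ih (rem.erase n) (n :: st) (h1.erase n)
        (List.nodup_cons.2 ⟨fun hns => h3 n hns hn, h2⟩)
        (by
          intro x hx
          rcases List.mem_cons.1 hx with rfl | hx'
          · exact h1.not_mem_erase
          · exact fun hmem => h3 x hx' (List.mem_of_mem_erase hmem))
      refine ⟨c1, c2, c3, ?_, ?_⟩
      · rw [c4, pv_toFinset_erase h1]
        ext q
        simp only [Finset.mem_sdiff, Finset.mem_erase, List.toFinset_cons, Finset.mem_insert]
        tauto
      · rw [c5, pv_toFinset_erase h1]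
        ext q
        simp only [List.toFinset_cons, Finset.mem_union, Finset.mem_insert, Finset.mem_inter,
          Finset.mem_erase]
        constructor
        · rintro ((rfl | hq) | ⟨⟨hq1, hq2⟩, hq3⟩)
          · exact Or.inr ⟨by simpa using hn, Or.inl rfl⟩
          · exact Or.inl hq
          · exact Or.inr ⟨hq2, Or.inr hq3⟩
        · rintro (hq | ⟨hq1, rfl | hq2⟩)
          · exact Or.inl (Or.inr hq)
          · exact Or.inl (Or.inl rfl)
          · by_cases hqn : q = n
            · exact Or.inl (Or.inl hqn)
            · exact Or.inr ⟨⟨hqn, hq1⟩, hq2⟩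
    · rw [show pvB_move (rem, st) n = (rem, st) from by simp [pvB_move, hn]]
      obtain ⟨c1, c2, c3, c4, c5⟩ := ih rem st h1 h2 h3
      refine ⟨c1, c2, c3, ?_, ?_⟩
      · rw [c4]
        ext q
        simp only [Finset.mem_sdiff, List.toFinset_cons, Finset.mem_insert]
        have : q ∈ rem.toFinset → q ≠ n := by
          intro hq rfl; exact hn (List.mem_toFinset.1 hq)
        tauto
      · rw [c5]
        ext q
        simp only [Finset.mem_union, Finset.mem_inter, List.toFinset_cons, Finset.mem_insert]
        have : q ∈ rem.toFinset → q ≠ n := by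
          intro hq rfl; exact hn (List.mem_toFinset.1 hq)
        tauto

-- full characterization of B's inner loop
theorem pvB_inner_char :
    ∀ (rem st : List (Int × Int)) (sz : Int), rem.Nodup → st.Nodup → (∀ x ∈ st, x ∉ rem) →
    (pvB_inner rem st sz).1
        = sz + ((pvKset (st.toFinset ∪ rem.toFinset) st.toFinset).card : Int) ∧
    (pvB_inner rem st sz).2.Nodup ∧
    (pvB_inner rem st sz).2.toFinset
        = rem.toFinset \ pvKset (st.toFinset ∪ rem.toFinset) st.toFinset := by
  intro rem st sz
  induction rem, st, sz using pvB_inner.induct with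
  | case1 rem sz =>
    intro h1 _ _
    exact ⟨by simp [pvB_inner, pvKset_empty], by simpa [pvB_inner] using h1,
      by simp [pvB_inner, pvKset_empty]⟩
  | case2 rem sz r c rest st ih =>
    intro h1 h2 h3
    obtain ⟨hxrest, h2'⟩ := List.nodup_cons.1 h2
    have hx : (r, c) ∉ rem := h3 _ List.mem_cons_self
    obtain ⟨c1, c2, c3, c4, c5⟩ := pvB_move_fold_spec
      [(r + 1, c), (r - 1, c), (r, c + 1), (r, c - 1)] rem rest h1 h2'
      (fun y hy => h3 y (List.mem_cons_of_mem _ hy))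
    have hst : st = List.foldl pvB_move (rem, rest)
        [(r + 1, c), (r - 1, c), (r, c + 1), (r, c - 1)] := rfl
    rw [← hst] at c1 c2 c3 c4 c5
    obtain ⟨i1, i2, i3⟩ := ih c1 c2 c3
    -- abbreviations
    set x : Int × Int := (r, c) with hxdef
    set nbrsT : Finset (Int × Int) :=
      ([(r + 1, c), (r - 1, c), (r, c + 1), (r, c - 1)] : List (Int × Int)).toFinset with hnb
    set G : Finset (Int × Int) := ((x :: rest).toFinset ∪ rem.toFinset) with hG
    set G1 : Finset (Int × Int) := (st.2.toFinset ∪ st.1.toFinset) with hG1def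
    have hxG : x ∈ G := by simp [hG]
    have hxnotrr : x ∉ rest.toFinset ∪ rem.toFinset := by
      simp only [Finset.mem_union, List.mem_toFinset]
      rintro (h | h)
      · exact hxrest h
      · exact hx h
    have hGe : G.erase x = rest.toFinset ∪ rem.toFinset := by
      rw [hG]
      simp only [List.toFinset_cons]
      rw [Finset.insert_union, Finset.erase_insert hxnotrr]
    have hG1 : G1 = G.erase x := by
      rw [hG1def, hGe, c4, c5]
      ext q
      simp only [Finset.mem_union, Finset.mem_inter, Finset.mem_sdiff]
      tauto
    have hadj_of_mem : ∀ q ∈ nbrsT, pvAdj x q := by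
      intro q hq
      rw [hnb] at hq
      exact pv_mem_nbrs.1 (List.mem_toFinset.1 hq)
    have hmem_of_adj : ∀ q, pvAdj x q → q ∈ nbrsT := by
      intro q hq
      rw [hnb]
      exact List.mem_toFinset.2 (pv_mem_nbrs.2 hq)
    have hS1 : st.2.toFinset = rest.toFinset ∪ (rem.toFinset ∩ nbrsT) := c5
    have hcut : pvKset G (x :: rest).toFinset = insert x (pvKset G1 st.2.toFinset) := by
      rw [hG1]
      refine pvK_cut hxG (by simp) ?_ ?_ ?_
      · intro q hq
        rw [hS1] at hq
        rcases Finset.mem_union.1 hq with hq | hq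
        · left
          exact Finset.mem_erase.2 ⟨fun hqeq => hxrest (List.mem_toFinset.1 (hqeq ▸ hq)),
            by simp [List.mem_toFinset.1 hq]⟩
        · right
          obtain ⟨hq1, hq2⟩ := Finset.mem_inter.1 hq
          exact ⟨Finset.mem_erase.2 ⟨fun hqeq => hx (List.mem_toFinset.1 (hqeq ▸ hq1)),
            by simp [hG, List.mem_toFinset.1 hq1]⟩, hadj_of_mem _ hq2⟩
      · intro q hq _
        obtain ⟨hq1, hq2⟩ := Finset.mem_erase.1 hq
        rw [hS1]
        apply Finset.mem_union_left
        simp only [List.toFinset_cons, Finset.mem_insert] at hq2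
        rcases hq2 with hqx | hq2
        · exact absurd hqx hq1
        · exact hq2
      · intro q hq hadj
        rw [hS1]
        rw [hGe] at hq
        rcases Finset.mem_union.1 hq with hq | hq
        · exact Finset.mem_union_left _ hq
        · exact Finset.mem_union_right _ (Finset.mem_inter.2 ⟨hq, hmem_of_adj _ hadj⟩)
    have hxK1 : x ∉ pvKset G1 st.2.toFinset := by
      intro hmem
      have := pvKset_subset hmem
      rw [hG1] at this
      exact (Finset.mem_erase.1 this).1 rfl
    have hmoved : ∀ q, q ∈ rem.toFinset → q ∈ nbrsT → q ∈ pvKset G1 st.2.toFinset := by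
      intro q hq1 hq2
      have hqS1 : q ∈ st.2.toFinset := by
        rw [hS1]; exact Finset.mem_union_right _ (Finset.mem_inter.2 ⟨hq1, hq2⟩)
      have hqG1 : q ∈ G1 := by
        rw [hG1, hGe]
        exact Finset.mem_union_right _ hq1
      exact mem_pvKset.2 ⟨q, hqS1, pvReach_refl hqG1⟩
    rw [pvB_inner]
    refine ⟨?_, i2, ?_⟩
    · rw [i1, hcut, Finset.card_insert_of_notMem hxK1]
      push_cast
      ring
    · rw [i3, hcut, c4]
      ext q
      simp only [Finset.mem_sdiff, Finset.mem_insert]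
      constructor
      · rintro ⟨⟨hq1, hq2⟩, hq3⟩
        refine ⟨hq1, ?_⟩
        rintro (hqx | hqK1)
        · exact hx (List.mem_toFinset.1 (hqx ▸ hq1))
        · exact hq3 hqK1
      · rintro ⟨hq1, hq2⟩
        refine ⟨⟨hq1, fun hqn => ?_⟩, fun hqK1 => hq2 (Or.inr hqK1)⟩
        exact hq2 (Or.inr (hmoved q hq1 hqn))


theorem pvPhi_empty : pvPhi (∅ : Finset (Int × Int)) = 0 := by
  simp [pvPhi]

theorem pvB_outer_char : ∀ (n : ℕ) (rem : List (Int × Int)) (best : Int),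
    rem.length ≤ n → rem.Nodup → 0 ≤ best →
    pvB_outer rem best = max best ((pvPhi rem.toFinset : Int)) := by
  intro n
  induction n with
  | zero =>
    intro rem best hlen hnd hb
    have : rem = [] := List.length_eq_zero_iff.1 (Nat.le_zero.1 hlen)
    subst this
    simp only [pvB_outer, List.toFinset_nil, pvPhi_empty, Nat.cast_zero]
    omega
  | succ n ih =>
    intro rem best hlen hnd hb
    match rem with
    | [] =>
      simp only [pvB_outer, List.toFinset_nil, pvPhi_empty, Nat.cast_zero]
      omega
    | seed :: rest =>
      obtain ⟨hs, hrest⟩ := List.nodup_cons.1 hnd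
      obtain ⟨j1, j2, j3⟩ := pvB_inner_char rest [seed] 0 hrest (List.nodup_singleton seed)
        (by intro y hy; simp only [List.mem_singleton] at hy; subst hy; exact hs)
      rw [pvB_outer]
      set G : Finset (Int × Int) := (seed :: rest).toFinset with hGdef
      have hseedG : seed ∈ G := by simp [hGdef]
      have hK : pvKset ([seed].toFinset ∪ rest.toFinset) [seed].toFinset = pvComp G seed := by
        have hGu : ([seed].toFinset ∪ rest.toFinset : Finset (Int × Int)) = G := by
          simp [hGdef]
        rw [hGu, show ([seed] : List (Int × Int)).toFinset = {seed} from by simp,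
          pvKset_singleton]
      have hseedK : seed ∈ pvComp G seed := self_mem_pvComp hseedG
      have hd1 : (pvB_inner rest [seed] 0).1 = ((pvComp G seed).card : Int) := by
        rw [j1, hK]; ring
      have hd3 : (pvB_inner rest [seed] 0).2.toFinset = G \ pvComp G seed := by
        rw [j3, hK]
        have hseedK' : seed ∈ pvComp (insert seed rest.toFinset) seed :=
          self_mem_pvComp (Finset.mem_insert_self _ _)
        ext q
        simp only [Finset.mem_sdiff, hGdef, List.toFinset_cons, Finset.mem_insert]
        constructor
        · rintro ⟨hq1, hq2⟩
          exact ⟨Or.inr hq1, hq2⟩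
        · rintro ⟨hq1 | hq1, hq2⟩
          · exfalso
            apply hq2
            rw [hq1]
            exact hseedK'
          · exact ⟨hq1, hq2⟩
      have hlen2 : (pvB_inner rest [seed] 0).2.length ≤ n :=
        le_trans (pvB_inner_len _ _ _) (by simpa using Nat.lt_succ_iff.1 hlen)
      have hb2 : 0 ≤ max best (pvB_inner rest [seed] 0).1 := le_trans hb (le_max_left _ _)
      rw [ih _ _ hlen2 j2 hb2, hd3, hd1, pvPhi_step hseedG, max_assoc]

-- the list B builds is exactly the allowed set, without duplicates
theorem pvB_build_nodup (m : List (List Int)) :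
    ((List.range m.length).flatMap (fun r =>
      (List.range (m.headD []).length).filterMap (fun c =>
        if (m.getD r []).getD c 1 = 0 then some ((r : Int), (c : Int)) else none))).Nodup := by
  rw [List.nodup_flatMap]
  constructor
  · intro r _
    refine List.Nodup.filterMap ?_ (List.nodup_range)
    intro a a' b hb1 hb2
    split at hb1
    · split at hb2
      · rw [Option.mem_def, Option.some_inj] at hb1 hb2
        have h1 : ((a : Int)) = b.2 := by rw [← hb1]
        have h2 : ((a' : Int)) = b.2 := by rw [← hb2]
        rw [← h2] at h1
        exact_mod_cast h1
      · simp at hb2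
    · simp at hb1
  · rw [List.pairwise_iff_getElem]
    intro i j hi hj hij
    intro p hp1 hp2
    simp only [List.mem_filterMap, List.getElem_range] at hp1 hp2
    obtain ⟨c1, _, hc1⟩ := hp1
    obtain ⟨c2, _, hc2⟩ := hp2
    split at hc1
    · split at hc2
      · rw [Option.some_inj] at hc1 hc2
        have h1 : p.1 = (i : Int) := by rw [← hc1]
        have h2 : p.1 = (j : Int) := by rw [← hc2]
        rw [h1] at h2
        simp only [List.length_range] at hi hj
        exact absurd (by exact_mod_cast h2) (Nat.ne_of_lt hij)
      · exact absurd hc2 (by simp)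
    · exact absurd hc1 (by simp)

theorem pvB_build_toFinset (m : List (List Int)) :
    ((List.range m.length).flatMap (fun r =>
      (List.range (m.headD []).length).filterMap (fun c =>
        if (m.getD r []).getD c 1 = 0 then some ((r : Int), (c : Int)) else none))).toFinset
      = pvAllowed m := by
  ext p
  rw [List.mem_toFinset, List.mem_flatMap, mem_pvAllowed]
  constructor
  · rintro ⟨r, hr, hp⟩
    rw [List.mem_filterMap] at hp
    obtain ⟨c, hc, hcond⟩ := hp
    rw [List.mem_range] at hr hc
    split at hcond
    · rename_i hzero
      rw [Option.some_inj] at hcond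
      subst hcond
      simp only [Int.toNat_natCast, pvAt]
      refine ⟨by positivity, by exact_mod_cast hr, by positivity, by exact_mod_cast hc, ?_⟩
      simpa [Int.toNat_natCast] using hzero
    · exact absurd hcond (by simp)
  · rintro ⟨h1, h2, h3, h4, h5⟩
    refine ⟨p.1.toNat, by rw [List.mem_range]; omega, ?_⟩
    rw [List.mem_filterMap]
    refine ⟨p.2.toNat, by rw [List.mem_range]; omega, ?_⟩
    rw [if_pos (by exact h5)]
    obtain ⟨a, b⟩ := p
    rw [Option.some_inj, Prod.mk.injEq]
    constructor <;> simp <;> omega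

theorem pvB_alt_eq (m : List (List Int)) :
    largest_zero_region_alt m = ((pvPhi (pvAllowed m)) : Int) := by
  unfold largest_zero_region_alt
  rw [pvB_outer_char _ _ 0 (le_refl _) (pvB_build_nodup m) (le_refl 0),
    pvB_build_toFinset m]
  omega


-- ---- A-side characterization ----

theorem pvCols_eq (m : List (List Int)) :
    (PySem.List.pyGet? m 0).getD [] = m.headD [] := by
  cases m <;> simp [PySem.List.pyGet?_zero_cons, PySem.List.pyGet?, PySem.List.pyIdx?]

theorem pvA_get_eq (m : List (List Int)) (hpre : Pre_largest_zero_region m)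
    {r c : Int} (h0r : 0 ≤ r) (hrlt : r < (m.length : Int))
    (h0c : 0 ≤ c) (hclt : c < ((m.headD []).length : Int)) :
    pvA_get m r c = pvAt m (r, c) := by
  have hr : r.toNat < m.length := by omega
  have hrow : m[r.toNat] ∈ m := List.getElem_mem hr
  have hlen : (m.headD []).length ≤ m[r.toNat].length := hpre.2 _ hrow
  have hc : c.toNat < m[r.toNat].length := by omega
  unfold pvA_get pvAt
  rw [PySem.List.pyGet?_eq_some_getElem m h0r hrlt]
  simp only [Option.getD_some]
  rw [PySem.List.pyGet?_eq_some_getElem (m[r.toNat]) h0c (by exact_mod_cast by omega)]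
  simp only [Option.getD_some]
  rw [List.getD_eq_getElem _ _ hr, List.getD_eq_getElem _ _ hc]

-- the DFS from s visits exactly {s}, then the components of its four neighbours
-- in the successively shrunk free sets
theorem pv_peel {G : Finset (Int × Int)} {r c : Int} (hs : (r, c) ∈ G)
    {C1 C2 C3 C4 G0 G1 G2 G3 : Finset (Int × Int)}
    (hG0 : G0 = G.erase (r, c))
    (hC1 : C1 = if (r + 1, c) ∈ G0 then pvComp G0 (r + 1, c) else ∅) (hG1 : G1 = G0 \ C1)
    (hC2 : C2 = if (r - 1, c) ∈ G1 then pvComp G1 (r - 1, c) else ∅) (hG2 : G2 = G1 \ C2)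
    (hC3 : C3 = if (r, c + 1) ∈ G2 then pvComp G2 (r, c + 1) else ∅) (hG3 : G3 = G2 \ C3)
    (hC4 : C4 = if (r, c - 1) ∈ G3 then pvComp G3 (r, c - 1) else ∅) :
    insert (r, c) (C1 ∪ C2 ∪ C3 ∪ C4) = pvComp G (r, c) := by
  have hsub0 : G0 ⊆ G := hG0 ▸ Finset.erase_subset _ _
  have hsub1 : G1 ⊆ G0 := hG1 ▸ Finset.sdiff_subset
  have hsub2 : G2 ⊆ G1 := hG2 ▸ Finset.sdiff_subset
  have hsub3 : G3 ⊆ G2 := hG3 ▸ Finset.sdiff_subset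
  have hadj1 : pvAdj (r, c) (r + 1, c) := Or.inl rfl
  have hadj2 : pvAdj (r, c) (r - 1, c) := Or.inr (Or.inl rfl)
  have hadj3 : pvAdj (r, c) (r, c + 1) := Or.inr (Or.inr (Or.inl rfl))
  have hadj4 : pvAdj (r, c) (r, c - 1) := Or.inr (Or.inr (Or.inr rfl))
  -- each C_i is contained in the component of (r, c)
  have hCsub : ∀ (C Gp : Finset (Int × Int)) (n : Int × Int), Gp ⊆ G0 → pvAdj (r, c) n →
      C = (if n ∈ Gp then pvComp Gp n else ∅) → C ⊆ pvComp G (r, c) := by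
    intro C Gp n hGp hadj hC
    rw [hC]
    split
    · rename_i hn
      refine pvComp_subset_pvComp (fun q hq => hsub0 (hGp hq)) ?_
      exact pvReach_tail (pvReach_refl hs) (hsub0 (hGp hn)) hadj
    · exact Finset.empty_subset _
  have hC1sub : C1 ⊆ pvComp G (r, c) := hCsub C1 G0 _ (fun q h => h) hadj1 hC1
  have hC2sub : C2 ⊆ pvComp G (r, c) := hCsub C2 G1 _ hsub1 hadj2 hC2
  have hC3sub : C3 ⊆ pvComp G (r, c) := hCsub C3 G2 _ (fun q h => hsub1 (hsub2 h)) hadj3 hC3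
  have hC4sub : C4 ⊆ pvComp G (r, c) :=
    hCsub C4 G3 _ (fun q h => hsub1 (hsub2 (hsub3 h))) hadj4 hC4
  -- decomposition of G0 into levels
  have hsplit : ∀ q ∈ G0, q ∈ C1 ∨ q ∈ C2 ∨ q ∈ C3 ∨ q ∈ C4 ∨ q ∈ G3 \ C4 := by
    intro q hq
    by_cases h1 : q ∈ C1
    · exact Or.inl h1
    by_cases h2 : q ∈ C2
    · exact Or.inr (Or.inl h2)
    by_cases h3 : q ∈ C3
    · exact Or.inr (Or.inr (Or.inl h3))
    by_cases h4 : q ∈ C4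
    · exact Or.inr (Or.inr (Or.inr (Or.inl h4)))
    refine Or.inr (Or.inr (Or.inr (Or.inr ?_)))
    rw [Finset.mem_sdiff, hG3, Finset.mem_sdiff, hG2, Finset.mem_sdiff, hG1, Finset.mem_sdiff]
    exact ⟨⟨⟨⟨hq, h1⟩, h2⟩, h3⟩, h4⟩
  have hG3sub : G3 \ C4 ⊆ G0 := fun q hq => hsub1 (hsub2 (hsub3 (Finset.mem_sdiff.1 hq).1))
  -- the leftover region touches none of the C_i
  have hleft : ∀ q ∈ G3 \ C4, q ∉ C1 ∧ q ∉ C2 ∧ q ∉ C3 ∧ q ∉ C4 := by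
    intro q hq
    obtain ⟨hq3, hq4⟩ := Finset.mem_sdiff.1 hq
    have h2' := hsub3 hq3
    have h1' := hsub2 h2'
    rw [hG1, Finset.mem_sdiff] at h1'
    rw [hG2, Finset.mem_sdiff] at h2'
    rw [hG3, Finset.mem_sdiff] at hq3
    exact ⟨h1'.2, h2'.2, hq3.2, hq4⟩
  -- the set T is closed under adjacency inside G
  have hclosed : ∀ p ∈ insert (r, c) (C1 ∪ C2 ∪ C3 ∪ C4), ∀ q ∈ G, pvAdj p q →
      q ∈ insert (r, c) (C1 ∪ C2 ∪ C3 ∪ C4) := by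
    intro p hp q hqG hadj
    by_cases hqs : q = (r, c)
    · exact hqs ▸ Finset.mem_insert_self _ _
    have hqG0 : q ∈ G0 := by
      rw [hG0, Finset.mem_erase]; exact ⟨hqs, hqG⟩
    simp only [Finset.mem_insert, Finset.mem_union] at hp ⊢
    rcases hsplit q hqG0 with h | h | h | h | h
    · exact Or.inr (Or.inl (Or.inl (Or.inl h)))
    · exact Or.inr (Or.inl (Or.inl (Or.inr h)))
    · exact Or.inr (Or.inl (Or.inr h))
    · exact Or.inr (Or.inr h)
    -- q lies in the untouched region: impossible unless it joins some component
    exfalso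
    obtain ⟨hn1, hn2, hn3, hn4⟩ := hleft q h
    rcases hp with rfl | ⟨⟨hp1 | hp2⟩ | hp3⟩ | hp4
    · -- p = (r, c): q is one of the four neighbours
      rcases hadj with rfl | rfl | rfl | rfl
      · apply hn1
        rw [hC1, if_pos hqG0]
        exact self_mem_pvComp hqG0
      · by_cases hq1 : (r - 1, c) ∈ G1
        · apply hn2
          rw [hC2, if_pos hq1]
          exact self_mem_pvComp hq1
        · -- (r-1,c) ∈ G0 but not in G1 means it is in C1
          apply hn1
          have := hqG0
          rw [hG1, Finset.mem_sdiff] at hq1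
          tauto
      · by_cases hq2 : (r, c + 1) ∈ G2
        · apply hn3
          rw [hC3, if_pos hq2]
          exact self_mem_pvComp hq2
        · rw [hG2, Finset.mem_sdiff] at hq2
          by_cases hq1 : (r, c + 1) ∈ G1
          · exact hn2 (by tauto)
          · rw [hG1, Finset.mem_sdiff] at hq1
            exact hn1 (by tauto)
      · by_cases hq3 : (r, c - 1) ∈ G3
        · apply hn4
          rw [hC4, if_pos hq3]
          exact self_mem_pvComp hq3
        · rw [hG3, Finset.mem_sdiff] at hq3
          by_cases hq2 : (r, c - 1) ∈ G2
          · exact hn3 (by tauto)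
          · rw [hG2, Finset.mem_sdiff] at hq2
            by_cases hq1 : (r, c - 1) ∈ G1
            · exact hn2 (by tauto)
            · rw [hG1, Finset.mem_sdiff] at hq1
              exact hn1 (by tauto)
    · -- p ∈ C1
      rw [hC1] at hp1
      split at hp1
      · rename_i hmem
        refine hn1 ?_
        rw [hC1, if_pos hmem]
        exact pvComp_closed hp1 (hG3sub h) hadj
      · exact absurd hp1 (Finset.notMem_empty _)
    · -- p ∈ C2
      rw [hC2] at hp2
      split at hp2
      · rename_i hmem
        refine hn2 ?_
        rw [hC2, if_pos hmem]
        refine pvComp_closed hp2 ?_ hadj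
        rw [hG1, Finset.mem_sdiff]
        exact ⟨hG3sub h, (hleft q h).1⟩
      · exact absurd hp2 (Finset.notMem_empty _)
    · -- p ∈ C3
      rw [hC3] at hp3
      split at hp3
      · rename_i hmem
        refine hn3 ?_
        rw [hC3, if_pos hmem]
        refine pvComp_closed hp3 ?_ hadj
        rw [hG2, Finset.mem_sdiff, hG1, Finset.mem_sdiff]
        exact ⟨⟨hG3sub h, (hleft q h).1⟩, (hleft q h).2.1⟩
      · exact absurd hp3 (Finset.notMem_empty _)
    · -- p ∈ C4
      rw [hC4] at hp4
      split at hp4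
      · rename_i hmem
        refine hn4 ?_
        rw [hC4, if_pos hmem]
        refine pvComp_closed hp4 ?_ hadj
        rw [hG3, Finset.mem_sdiff, hG2, Finset.mem_sdiff, hG1, Finset.mem_sdiff]
        exact ⟨⟨⟨hG3sub h, (hleft q h).1⟩, (hleft q h).2.1⟩, (hleft q h).2.2.1⟩
      · exact absurd hp4 (Finset.notMem_empty _)
  apply Finset.Subset.antisymm
  · intro q hq
    rcases Finset.mem_insert.1 hq with rfl | hq'
    · exact self_mem_pvComp hs
    rcases Finset.mem_union.1 hq' with hq'' | h4
    · rcases Finset.mem_union.1 hq'' with hq3 | h3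
      · rcases Finset.mem_union.1 hq3 with h1 | h2
        · exact hC1sub h1
        · exact hC2sub h2
      · exact hC3sub h3
    · exact hC4sub h4
  · exact pvComp_min _ (Finset.mem_insert_self _ _) hclosed


-- component-or-empty, matching the value/visited pair a dfs call produces
noncomputable def pvCof (G : Finset (Int × Int)) (s : Int × Int) : Finset (Int × Int) :=
  if s ∈ G then pvComp G s else ∅

theorem pvCof_subset {G : Finset (Int × Int)} {s : Int × Int} : pvCof G s ⊆ G := by
  unfold pvCof
  split
  · exact pvComp_subset
  · exact Finset.empty_subset _

theorem pv_sdiff_union (A W C : Finset (Int × Int)) : A \ (W ∪ C) = (A \ W) \ C := by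
  ext q
  simp only [Finset.mem_sdiff, Finset.mem_union]
  tauto

theorem pv_sdiff_insert (A V : Finset (Int × Int)) (s : Int × Int) :
    A \ insert s V = (A \ V).erase s := by
  ext q
  simp only [Finset.mem_sdiff, Finset.mem_insert, Finset.mem_erase]
  tauto

theorem pvA_dfs_char (m : List (List Int)) (hpre : Pre_largest_zero_region m) :
    ∀ (fuel : ℕ) (V : Finset (Int × Int)) (r c : Int),
      (pvAllowed m \ V).card < fuel →
      pvA_dfs m (m.length : Int) ((m.headD []).length : Int) fuel V r c =
        (((pvCof (pvAllowed m \ V) (r, c)).card : Int),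
          V ∪ pvCof (pvAllowed m \ V) (r, c)) := by
  intro fuel
  induction fuel with
  | zero => intro V r c h; exact absurd h (Nat.not_lt_zero _)
  | succ fuel ih =>
    intro V r c hfuel
    rw [pvA_dfs]
    by_cases hb : r < 0 ∨ r ≥ (m.length : Int) ∨ c < 0 ∨ c ≥ ((m.headD []).length : Int)
    · rw [if_pos hb]
      have hnot : (r, c) ∉ pvAllowed m \ V := by
        rw [Finset.mem_sdiff, mem_pvAllowed]
        rintro ⟨⟨a1, a2, a3, a4, -⟩, -⟩
        dsimp only at a1 a2 a3 a4
        rcases hb with h | h | h | h <;> omega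
      rw [pvCof, if_neg hnot]
      simp
    · rw [if_neg hb]
      push_neg at hb
      obtain ⟨h1, h2, h3, h4⟩ := hb
      have hget := pvA_get_eq m hpre h1 (by omega) h3 (by omega)
      by_cases hv : (r, c) ∈ V ∨ pvA_get m r c ≠ 0
      · rw [if_pos hv]
        have hnot : (r, c) ∉ pvAllowed m \ V := by
          rw [Finset.mem_sdiff, mem_pvAllowed]
          rcases hv with hv | hv
          · rintro ⟨-, hnv⟩
            exact hnv hv
          · rw [hget] at hv
            rintro ⟨⟨-, -, -, -, hz⟩, -⟩
            exact hv hz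
        rw [pvCof, if_neg hnot]
        simp
      · rw [if_neg hv]
        push_neg at hv
        obtain ⟨hvV, hv0⟩ := hv
        rw [hget] at hv0
        have hsA : (r, c) ∈ pvAllowed m := by
          rw [mem_pvAllowed]
          exact ⟨h1, h2, h3, h4, hv0⟩
        have hgood : (r, c) ∈ pvAllowed m \ V := Finset.mem_sdiff.2 ⟨hsA, hvV⟩
        set G : Finset (Int × Int) := pvAllowed m \ V with hG
        have hA0 : pvAllowed m \ insert (r, c) V = G.erase (r, c) :=
          pv_sdiff_insert _ _ _
        have hc0 : (G.erase (r, c)).card < fuel := by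
          have h := Finset.card_erase_lt_of_mem hgood
          omega
        -- child 1
        have hd1 := ih (insert (r, c) V) (r + 1) c (by rw [hA0]; exact hc0)
        rw [hA0] at hd1
        set C1 := pvCof (G.erase (r, c)) (r + 1, c) with hC1
        have hA1 : pvAllowed m \ (insert (r, c) V ∪ C1) = G.erase (r, c) \ C1 := by
          rw [pv_sdiff_union, hA0]
        have hc1 : (G.erase (r, c) \ C1).card < fuel :=
          lt_of_le_of_lt (Finset.card_le_card Finset.sdiff_subset) hc0
        -- child 2
        have hd2 := ih (insert (r, c) V ∪ C1) (r - 1) c (by rw [hA1]; exact hc1)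
        rw [hA1] at hd2
        set C2 := pvCof (G.erase (r, c) \ C1) (r - 1, c) with hC2
        have hA2 : pvAllowed m \ (insert (r, c) V ∪ C1 ∪ C2) = (G.erase (r, c) \ C1) \ C2 := by
          rw [pv_sdiff_union, hA1]
        have hc2 : ((G.erase (r, c) \ C1) \ C2).card < fuel :=
          lt_of_le_of_lt (Finset.card_le_card Finset.sdiff_subset) hc1
        -- child 3
        have hd3 := ih (insert (r, c) V ∪ C1 ∪ C2) r (c + 1) (by rw [hA2]; exact hc2)
        rw [hA2] at hd3
        set C3 := pvCof ((G.erase (r, c) \ C1) \ C2) (r, c + 1) with hC3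
        have hA3 : pvAllowed m \ (insert (r, c) V ∪ C1 ∪ C2 ∪ C3) = ((G.erase (r, c) \ C1) \ C2) \ C3 := by
          rw [pv_sdiff_union, hA2]
        have hc3 : (((G.erase (r, c) \ C1) \ C2) \ C3).card < fuel :=
          lt_of_le_of_lt (Finset.card_le_card Finset.sdiff_subset) hc2
        -- child 4
        have hd4 := ih (insert (r, c) V ∪ C1 ∪ C2 ∪ C3) r (c - 1) (by rw [hA3]; exact hc3)
        rw [hA3] at hd4
        set C4 := pvCof (((G.erase (r, c) \ C1) \ C2) \ C3) (r, c - 1) with hC4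
        -- the peel lemma
        have hpeel : insert (r, c) (C1 ∪ C2 ∪ C3 ∪ C4) = pvComp G (r, c) :=
          pv_peel hgood rfl (by rw [hC1, pvCof]) rfl (by rw [hC2, pvCof]) rfl
            (by rw [hC3, pvCof]) rfl (by rw [hC4, pvCof])
        -- disjointness and membership facts for the size count
        have hsub1 : C1 ⊆ G.erase (r, c) := pvCof_subset
        have hsub2 : C2 ⊆ G.erase (r, c) \ C1 := pvCof_subset
        have hsub3 : C3 ⊆ (G.erase (r, c) \ C1) \ C2 := pvCof_subset
        have hsub4 : C4 ⊆ ((G.erase (r, c) \ C1) \ C2) \ C3 := pvCof_subset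
        have hs1 : (r, c) ∉ C1 := fun h => (Finset.mem_erase.1 (hsub1 h)).1 rfl
        have hs2 : (r, c) ∉ C2 :=
          fun h => (Finset.mem_erase.1 (Finset.mem_sdiff.1 (hsub2 h)).1).1 rfl
        have hs3 : (r, c) ∉ C3 :=
          fun h => (Finset.mem_erase.1
            (Finset.mem_sdiff.1 (Finset.mem_sdiff.1 (hsub3 h)).1).1).1 rfl
        have hs4 : (r, c) ∉ C4 :=
          fun h => (Finset.mem_erase.1 (Finset.mem_sdiff.1
            (Finset.mem_sdiff.1 (Finset.mem_sdiff.1 (hsub4 h)).1).1).1).1 rfl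
        have hdis12 : Disjoint C1 C2 := Finset.disjoint_left.2
          (fun ha h1' h2' => (Finset.mem_sdiff.1 (hsub2 h2')).2 h1')
        have hdis13 : Disjoint C1 C3 := Finset.disjoint_left.2
          (fun ha h1' h3' => (Finset.mem_sdiff.1 (Finset.mem_sdiff.1 (hsub3 h3')).1).2 h1')
        have hdis23 : Disjoint C2 C3 := Finset.disjoint_left.2
          (fun ha h2' h3' => (Finset.mem_sdiff.1 (hsub3 h3')).2 h2')
        have hdis14 : Disjoint C1 C4 := Finset.disjoint_left.2
          (fun ha h1' h4' => (Finset.mem_sdiff.1 (Finset.mem_sdiff.1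
            (Finset.mem_sdiff.1 (hsub4 h4')).1).1).2 h1')
        have hdis24 : Disjoint C2 C4 := Finset.disjoint_left.2
          (fun ha h2' h4' => (Finset.mem_sdiff.1 (Finset.mem_sdiff.1 (hsub4 h4')).1).2 h2')
        have hdis34 : Disjoint C3 C4 := Finset.disjoint_left.2
          (fun ha h3' h4' => (Finset.mem_sdiff.1 (hsub4 h4')).2 h3')
        have hcardU : (C1 ∪ C2 ∪ C3 ∪ C4).card = C1.card + C2.card + C3.card + C4.card := by
          rw [Finset.card_union_of_disjoint (by
            rw [Finset.disjoint_union_left, Finset.disjoint_union_left]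
            exact ⟨⟨hdis14, hdis24⟩, hdis34⟩)]
          rw [Finset.card_union_of_disjoint (by
            rw [Finset.disjoint_union_left]
            exact ⟨hdis13, hdis23⟩)]
          rw [Finset.card_union_of_disjoint hdis12]
        have hnotmem : (r, c) ∉ C1 ∪ C2 ∪ C3 ∪ C4 := by
          simp only [Finset.mem_union]
          rintro (((h | h) | h) | h)
          · exact hs1 h
          · exact hs2 h
          · exact hs3 h
          · exact hs4 h
        have hcardC : (pvComp G (r, c)).card
            = 1 + (C1.card + C2.card + C3.card + C4.card) := by
          rw [← hpeel, Finset.card_insert_of_notMem hnotmem, hcardU]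
          omega
        have hCof : pvCof G (r, c) = pvComp G (r, c) := by rw [pvCof, if_pos hgood]
        clear_value C1 C2 C3 C4
        simp only [hd1, hd2, hd3, hd4, hCof, Prod.mk.injEq]
        constructor
        · rw [hcardC]
          push_cast
          ring
        · rw [← hpeel]
          ext q
          simp only [Finset.mem_union, Finset.mem_insert]
          constructor
          · rintro (((((hq | hq) | hq) | hq) | hq) | hq)
            · exact Or.inr (Or.inl hq)
            · exact Or.inl hq
            · exact Or.inr (Or.inr (Or.inl (Or.inl (Or.inl hq))))
            · exact Or.inr (Or.inr (Or.inl (Or.inl (Or.inr hq))))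
            · exact Or.inr (Or.inr (Or.inl (Or.inr hq)))
            · exact Or.inr (Or.inr (Or.inr hq))
          · rintro (hq | hq | (((hq | hq) | hq) | hq))
            · exact Or.inl (Or.inl (Or.inl (Or.inl (Or.inr hq))))
            · exact Or.inl (Or.inl (Or.inl (Or.inl (Or.inl hq))))
            · exact Or.inl (Or.inl (Or.inl (Or.inr hq)))
            · exact Or.inl (Or.inl (Or.inr hq))
            · exact Or.inl (Or.inr hq)
            · exact Or.inr hq


-- ---- A's outer scan ----

-- one step of A's i/j scan, used to restate the port's nested fold
def pvA_step (m : List (List Int)) (st : Int × Finset (Int × Int)) (p : Int × Int) :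
    Int × Finset (Int × Int) :=
  if pvA_get m p.1 p.2 = 0 ∧ p ∉ st.2 then
    let d := pvA_dfs m (m.length : Int) ((m.headD []).length : Int)
      (m.length * (m.headD []).length + 1) st.2 p.1 p.2
    (max st.1 d.1, d.2)
  else st

def pvCells (m : List (List Int)) : List (Int × Int) :=
  (List.range m.length).flatMap (fun (i : ℕ) =>
    (List.range (m.headD []).length).map (fun (j : ℕ) => ((i : Int), (j : Int))))

theorem pvA_nested (m : List (List Int)) (n k : ℕ) (init : Int × Finset (Int × Int)) :
    (List.range n).foldl (fun st (i : ℕ) =>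
      (List.range k).foldl (fun st (j : ℕ) => pvA_step m st ((i : Int), (j : Int))) st) init
      = ((List.range n).flatMap (fun (i : ℕ) =>
          (List.range k).map (fun (j : ℕ) => ((i : Int), (j : Int))))).foldl (pvA_step m) init := by
  induction n generalizing init with
  | zero => rfl
  | succ n ih =>
    rw [List.range_succ, List.foldl_append, List.flatMap_append, List.foldl_append, ih]
    simp [List.foldl_map]

theorem pvA_port_eq (m : List (List Int)) :
    largest_zero_region m = ((pvCells m).foldl (pvA_step m) ((0 : Int), (∅ : Finset (Int × Int)))).1 := by
  unfold largest_zero_region pvCells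
  dsimp only
  rw [pvCols_eq]
  rw [show ((m.length : Int)) = ((m.length : ℕ) : Int) from rfl]
  rw [show (((m.headD []).length : Int)) = (((m.headD []).length : ℕ) : Int) from rfl]
  rw [PySem.List.pyRange_zero_natCast, PySem.List.pyRange_zero_natCast]
  simp only [List.foldl_map]
  exact congrArg Prod.fst (pvA_nested m m.length (m.headD []).length (0, ∅))

theorem pv_card_allowed (m : List (List Int)) :
    (pvAllowed m).card ≤ m.length * (m.headD []).length := by
  unfold pvAllowed
  refine le_trans Finset.card_image_le (le_trans (Finset.card_le_card (Finset.filter_subset _ _)) ?_)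
  rw [Finset.card_product, Finset.card_range, Finset.card_range]

theorem pvA_scan (m : List (List Int)) (hpre : Pre_largest_zero_region m) :
    ∀ (cells : List (Int × Int)) (V : Finset (Int × Int)) (acc : Int),
    0 ≤ acc →
    (∀ p ∈ cells, 0 ≤ p.1 ∧ p.1 < (m.length : Int) ∧ 0 ≤ p.2 ∧
      p.2 < ((m.headD []).length : Int)) →
    (∀ p ∈ pvAllowed m, p ∉ V → p ∈ cells) →
    (cells.foldl (pvA_step m) (acc, V)).1 = max acc ((pvPhi (pvAllowed m \ V) : Int)) := by
  intro cells
  induction cells with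
  | nil =>
    intro V acc hacc _ hcov
    have hempty : pvAllowed m \ V = ∅ := by
      rw [Finset.eq_empty_iff_forall_notMem]
      intro p hp
      obtain ⟨hp1, hp2⟩ := Finset.mem_sdiff.1 hp
      exact absurd (hcov p hp1 hp2) (List.not_mem_nil)
    rw [List.foldl_nil, hempty, pvPhi_empty]
    simp only [Nat.cast_zero]
    omega
  | cons p cells ih =>
    intro V acc hacc hbounds hcov
    obtain ⟨hb1, hb2, hb3, hb4⟩ := hbounds p List.mem_cons_self
    rw [List.foldl_cons]
    by_cases hcond : pvA_get m p.1 p.2 = 0 ∧ p ∉ V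
    · have hget : pvA_get m p.1 p.2 = pvAt m p := by
        rw [pvA_get_eq m hpre hb1 hb2 hb3 hb4]
      have hpA : p ∈ pvAllowed m := by
        rw [mem_pvAllowed]
        exact ⟨hb1, hb2, hb3, hb4, by rw [← hget]; exact hcond.1⟩
      have hpG : p ∈ pvAllowed m \ V := Finset.mem_sdiff.2 ⟨hpA, hcond.2⟩
      have hfuel : (pvAllowed m \ V).card < m.length * (m.headD []).length + 1 := by
        have h1 := Finset.card_le_card (Finset.sdiff_subset (s := pvAllowed m) (t := V))
        have h2 := pv_card_allowed m
        omega
      have hdfs := pvA_dfs_char m hpre (m.length * (m.headD []).length + 1) V p.1 p.2 hfuel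
      have hCof : pvCof (pvAllowed m \ V) (p.1, p.2) = pvComp (pvAllowed m \ V) p := by
        rw [pvCof, if_pos (by rwa [Prod.mk.eta])]
      rw [hCof] at hdfs
      have hstep : pvA_step m (acc, V) p
          = (max acc ((pvComp (pvAllowed m \ V) p).card : Int),
             V ∪ pvComp (pvAllowed m \ V) p) := by
        rw [pvA_step, if_pos (by exact hcond)]
        rw [show pvA_dfs m (m.length : Int) ((m.headD []).length : Int)
            (m.length * (m.headD []).length + 1) (acc, V).2 p.1 p.2
            = pvA_dfs m (m.length : Int) ((m.headD []).length : Int)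
              (m.length * (m.headD []).length + 1) V p.1 p.2 from rfl, hdfs]
      rw [hstep]
      have hA' : pvAllowed m \ (V ∪ pvComp (pvAllowed m \ V) p)
          = (pvAllowed m \ V) \ pvComp (pvAllowed m \ V) p := pv_sdiff_union _ _ _
      have ihres := ih (V ∪ pvComp (pvAllowed m \ V) p)
        (max acc ((pvComp (pvAllowed m \ V) p).card : Int))
        (le_trans hacc (le_max_left _ _))
        (fun q hq => hbounds q (List.mem_cons_of_mem _ hq))
        (by
          intro q hq1 hq2
          rw [Finset.mem_union] at hq2
          push_neg at hq2
          rcases List.mem_cons.1 (hcov q hq1 hq2.1) with rfl | h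
          · exact absurd (self_mem_pvComp hpG) hq2.2
          · exact h)
      rw [ihres, hA', pvPhi_step hpG, max_assoc]
    · have hstep : pvA_step m (acc, V) p = (acc, V) := by
        rw [pvA_step, if_neg (by exact hcond)]
      rw [hstep]
      refine ih V acc hacc (fun q hq => hbounds q (List.mem_cons_of_mem _ hq)) ?_
      intro q hq1 hq2
      rcases List.mem_cons.1 (hcov q hq1 hq2) with rfl | h
      · exfalso
        apply hcond
        rw [mem_pvAllowed] at hq1
        refine ⟨?_, hq2⟩
        rw [pvA_get_eq m hpre hq1.1 hq1.2.1 hq1.2.2.1 hq1.2.2.2.1]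
        exact hq1.2.2.2.2
      · exact h

theorem pvCells_bounds (m : List (List Int)) :
    ∀ p ∈ pvCells m, 0 ≤ p.1 ∧ p.1 < (m.length : Int) ∧ 0 ≤ p.2 ∧
      p.2 < ((m.headD []).length : Int) := by
  intro p hp
  unfold pvCells at hp
  rw [List.mem_flatMap] at hp
  obtain ⟨i, hi, hp⟩ := hp
  rw [List.mem_map] at hp
  obtain ⟨j, hj, rfl⟩ := hp
  rw [List.mem_range] at hi hj
  refine ⟨?_, ?_, ?_, ?_⟩
  · show (0 : Int) ≤ (i : Int)
    positivity
  · show ((i : Int)) < ((m.length : ℕ) : Int)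
    exact_mod_cast hi
  · show (0 : Int) ≤ (j : Int)
    positivity
  · show ((j : Int)) < (((m.headD []).length : ℕ) : Int)
    exact_mod_cast hj

theorem pvCells_cover (m : List (List Int)) :
    ∀ p ∈ pvAllowed m, p ∈ pvCells m := by
  intro p hp
  rw [mem_pvAllowed] at hp
  unfold pvCells
  rw [List.mem_flatMap]
  refine ⟨p.1.toNat, by rw [List.mem_range]; omega, ?_⟩
  rw [List.mem_map]
  refine ⟨p.2.toNat, by rw [List.mem_range]; omega, ?_⟩
  obtain ⟨a, b⟩ := p
  simp only [Prod.mk.injEq]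
  obtain ⟨h1, h2, h3, h4, -⟩ := hp
  constructor <;> simp <;> omega

-- ===== VERDICT (by name: the statement is the Claim_ definition above) =====
theorem largest_zero_region_spec : Claim_equal_largest_zero_region := by
  intro m _ hpre
  unfold Spec_largest_zero_region
  rw [pvB_alt_eq, pvA_port_eq m]
  rw [pvA_scan m hpre (pvCells m) ∅ 0 (le_refl 0) (pvCells_bounds m)
    (fun p hp _ => pvCells_cover m p hp)]
  rw [Finset.sdiff_empty]
  have := Int.natCast_nonneg (pvPhi (pvAllowed m))
  omega
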